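-- pv_equiv track=rewrite | github.com/RobbiiB/AOC2024 | Day_1.py | problem_1
-- ===== SOURCE A (Python) =====
-- def problem_1(data: [[int]]) -> int:
--     dist: int = 0
--     while data[0].__len__()>0:
--         min_left_ind = data[0].index(min(data[0]))
--         min_right_ind = data[1].index(min(data[1]))
--         dist += abs(data[0][min_left_ind] - data[1][min_right_ind])
--         del data[0][min_left_ind]
--         del data[1][min_right_ind]
--     return dist
-- ===== SOURCE B (Python) =====
-- def problem_1(data: [[int]]) -> int:
--     return sum(abs(a - b) for a, b in zip(sorted(data[0]), sorted(data[1])))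
-- ===== Notes on version B (the rewrite author's own statement) =====
-- stated objective: faster
-- what changed: Replaces the repeated min-search/index/delete loop (quadratic selection sort in disguise) by sorting both lists once and summing |a-b| over the element-wise zip; B does not mutate data, the claim is about the return value only.
-- outside the precondition, e.g. on problem_1([[]]): A returns 0, B raises IndexError; on problem_1([]): A raises IndexError, B raises IndexError
import Mathlib
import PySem

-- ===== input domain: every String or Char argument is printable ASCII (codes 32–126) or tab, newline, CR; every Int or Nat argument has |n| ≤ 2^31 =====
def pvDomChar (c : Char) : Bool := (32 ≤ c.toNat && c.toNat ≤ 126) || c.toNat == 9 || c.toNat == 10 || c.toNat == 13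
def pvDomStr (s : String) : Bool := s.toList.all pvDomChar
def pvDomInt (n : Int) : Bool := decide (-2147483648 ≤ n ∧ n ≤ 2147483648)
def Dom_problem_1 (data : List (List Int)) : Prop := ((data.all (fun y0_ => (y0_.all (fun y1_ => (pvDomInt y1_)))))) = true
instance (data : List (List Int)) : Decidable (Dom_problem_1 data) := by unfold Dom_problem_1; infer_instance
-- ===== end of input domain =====

-- B replaces A's repeated min/index/delete scans by sorting both lists once and summing
-- |a-b| over the element-wise zip (objective: faster). A empties data[0] and shrinks
-- data[1] in place; B does not mutate — the equivalence proved is about the return value only.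

-- ===== PORT A =====
-- the while loop of A: one recursive step per iteration, fuel = initial length of data[0]
-- (each iteration deletes one element of data[0], so this fuel is exact)
def problem1Loop (fuel : Nat) (l r : List Int) (dist : Int) : Int :=
  match fuel with
  | 0 => dist
  | fuel + 1 =>
    if l.length > 0 then
      match PySem.List.min? l (fun x => x), PySem.List.min? r (fun x => x) with
      | some ml, some mr =>
        match PySem.List.index? l ml, PySem.List.index? r mr with
        | some i, some j =>
          match PySem.List.pyGet? l (i : Int), PySem.List.pyGet? r (j : Int) with
          | some vl, some vr =>
            problem1Loop fuel (l.eraseIdx i) (r.eraseIdx j) (dist + |vl - vr|)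
          | _, _ => dist   -- IndexError: unreachable under Pre_
        | _, _ => dist     -- unreachable (min is a member)
      | _, _ => dist       -- ValueError from min([]): excluded by Pre_
    else dist

def problem_1 (data : List (List Int)) : Int :=
  let l := (PySem.List.pyGet? data (0 : Int)).getD []   -- data[0]; Pre_ guarantees it exists
  let r := (PySem.List.pyGet? data (1 : Int)).getD []   -- data[1]; Pre_ guarantees it exists
  problem1Loop l.length l r 0

-- ===== PORT B =====
def problem_1_alt (data : List (List Int)) : Int :=
  let l := (PySem.List.pyGet? data (0 : Int)).getD []
  let r := (PySem.List.pyGet? data (1 : Int)).getD []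
  ((PySem.List.sorted l (fun x => x)).zip (PySem.List.sorted r (fun x => x))).foldl
    (fun acc p => acc + |p.1 - p.2|) 0

-- ===== PRECONDITION & SPEC =====
-- Pre_ excludes the inputs on which A raises (data shorter than 2 lists while data[0] is
-- nonempty, or data[0] longer than data[1]: min([]) then raises ValueError), and the one
-- degenerate shape data = [l] with l = [] — there A returns 0 only because the loop body
-- never touches the missing data[1], while B naturally raises IndexError reading data[1].
def Pre_problem_1 (data : List (List Int)) : Prop :=
  2 ≤ data.length ∧ (data.getD 0 []).length ≤ (data.getD 1 []).length
instance (data : List (List Int)) : Decidable (Pre_problem_1 data) := by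
  unfold Pre_problem_1; infer_instance

def pvWitness_problem_1 : List (List Int) := [[3, 1, 2], [4, 0, 5, 2]]

def Spec_problem_1 (data : List (List Int)) (out : Int) : Prop := out = problem_1_alt data
instance (data : List (List Int)) (out : Int) : Decidable (Spec_problem_1 data out) := by
  unfold Spec_problem_1; infer_instance

-- ===== CLAIM (what is proved, stated in full; the proofs are below) =====
def Claim_equal_problem_1 : Prop :=
  ∀ (data : List (List Int)), Dom_problem_1 data → Pre_problem_1 data →
    Spec_problem_1 data (problem_1 data)

-- ===== LEMMAS AND PROOFS =====

-- the sum B computes, as a named abbreviation for the proofs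
def pvSumAbs (sl sr : List Int) : Int :=
  ((sl.zip sr).map (fun p => |p.1 - p.2|)).sum

theorem foldl_absSum (ps : List (Int × Int)) (init : Int) :
    ps.foldl (fun acc p => acc + |p.1 - p.2|) init
      = init + (ps.map (fun p => |p.1 - p.2|)).sum := by
  induction ps generalizing init with
  | nil => simp
  | cons p t ih => simp [List.foldl_cons, ih]; ring

-- head of sorted l is the first minimum and the rest is sorted (l.erase m)
theorem sorted_cons_min (l : List Int) (m : Int) (hm : m ∈ l)
    (hmin : ∀ y ∈ l, m ≤ y) :
    PySem.List.sorted l (fun x => x) false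
      = m :: PySem.List.sorted (l.erase m) (fun x => x) false := by
  refine (PySem.List.sorted_id_eq_of_perm_of_pairwise l (m :: PySem.List.sorted (l.erase m) (fun x => x) false) ?_ ?_)
  · exact ((PySem.List.sorted_perm (l.erase m) (fun x => x) false).cons m).trans
      (List.perm_cons_erase hm).symm
  · refine List.Pairwise.cons ?_ ?_
    · intro y hy
      exact hmin y (List.mem_of_mem_erase ((PySem.List.mem_sorted (l.erase m) (fun x => x) false y).1 hy))
    · exact PySem.List.sorted_pairwise (l.erase m) (fun x => x)

-- the loop invariant: with enough fuel and |l| ≤ |r|, A's loop computes dist + pvSumAbs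
theorem problem1Loop_eq (fuel : Nat) :
    ∀ (l r : List Int) (dist : Int), l.length = fuel → l.length ≤ r.length →
      problem1Loop fuel l r dist
        = dist + pvSumAbs (PySem.List.sorted l (fun x => x) false)
                          (PySem.List.sorted r (fun x => x) false) := by
  induction fuel with
  | zero =>
    intro l r dist hlen _
    have : l = [] := List.length_eq_zero_iff.mp hlen
    simp [this, problem1Loop, pvSumAbs, PySem.List.sorted]
  | succ n ih =>
    intro l r dist hlen hle
    have hlpos : 0 < l.length := by omega
    have hl : l ≠ [] := by intro h; simp [h] at hlpos
    have hrpos : 0 < r.length := lt_of_lt_of_le hlpos hle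
    have hr : r ≠ [] := by intro h; simp [h] at hrpos
    -- min? returns some on nonempty lists
    obtain ⟨ml, hml⟩ : ∃ m, PySem.List.min? l (fun x => x) = some m := by
      cases h : PySem.List.min? l (fun x => x) with
      | none => exact absurd ((PySem.List.min?_eq_none_iff l (fun x => x)).mp h) hl
      | some m => exact ⟨m, rfl⟩
    obtain ⟨mr, hmr⟩ : ∃ m, PySem.List.min? r (fun x => x) = some m := by
      cases h : PySem.List.min? r (fun x => x) with
      | none => exact absurd ((PySem.List.min?_eq_none_iff r (fun x => x)).mp h) hr
      | some m => exact ⟨m, rfl⟩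
    have hml_mem : ml ∈ l := PySem.List.min?_mem hml
    have hmr_mem : mr ∈ r := PySem.List.min?_mem hmr
    obtain ⟨i, hi⟩ : ∃ i, PySem.List.index? l ml = some i :=
      Option.isSome_iff_exists.mp ((PySem.List.index?_isSome_iff l ml).mpr hml_mem)
    obtain ⟨j, hj⟩ : ∃ j, PySem.List.index? r mr = some j :=
      Option.isSome_iff_exists.mp ((PySem.List.index?_isSome_iff r mr).mpr hmr_mem)
    obtain ⟨hik, hival, _⟩ := PySem.List.getElem_of_index?_eq_some hi
    obtain ⟨hjk, hjval, _⟩ := PySem.List.getElem_of_index?_eq_some hj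
    have hgl : PySem.List.pyGet? l (i : Int) = some ml := by
      rw [PySem.List.pyGet?_natCast, List.getElem?_eq_getElem hik]; exact congrArg some hival
    have hgr : PySem.List.pyGet? r (j : Int) = some mr := by
      rw [PySem.List.pyGet?_natCast, List.getElem?_eq_getElem hjk]; exact congrArg some hjval
    -- erasing at the first index of the minimum = erasing the minimum
    have hidxl : List.idxOf ml l = i := by
      rw [List.idxOf_eq_getD_idxOf?, ← PySem.List.index?_eq_idxOf?, hi]; rfl
    have hidxr : List.idxOf mr r = j := by
      rw [List.idxOf_eq_getD_idxOf?, ← PySem.List.index?_eq_idxOf?, hj]; rfl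
    have heri : l.eraseIdx i = l.erase ml := by
      rw [← List.eraseIdx_idxOf_eq_erase, hidxl]
    have herj : r.eraseIdx j = r.erase mr := by
      rw [← List.eraseIdx_idxOf_eq_erase, hidxr]
    have hlen' : (l.erase ml).length = n := by
      rw [List.length_erase_of_mem hml_mem]; omega
    have hle' : (l.erase ml).length ≤ (r.erase mr).length := by
      rw [List.length_erase_of_mem hml_mem, List.length_erase_of_mem hmr_mem]; omega
    have step := ih (l.erase ml) (r.erase mr) (dist + |ml - mr|) hlen' hle'
    have hsl := sorted_cons_min l ml hml_mem (fun y hy => PySem.List.min?_isMin hml y hy)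
    have hsr := sorted_cons_min r mr hmr_mem (fun y hy => PySem.List.min?_isMin hmr y hy)
    calc problem1Loop (n + 1) l r dist
        = problem1Loop n (l.erase ml) (r.erase mr) (dist + |ml - mr|) := by
          rw [problem1Loop]
          simp only [hlpos, if_pos, hml, hmr, hi, hj, hgl, hgr, heri, herj]
      _ = dist + |ml - mr| + pvSumAbs (PySem.List.sorted (l.erase ml) (fun x => x) false)
            (PySem.List.sorted (r.erase mr) (fun x => x) false) := step
      _ = dist + pvSumAbs (PySem.List.sorted l (fun x => x) false)
            (PySem.List.sorted r (fun x => x) false) := by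
          rw [hsl, hsr]; simp [pvSumAbs]; ring

-- ===== VERDICT (by name: the statement is the Claim_ definition above) =====
theorem problem_1_spec : Claim_equal_problem_1 := by
  intro data _ hpre
  obtain ⟨hlen, hle⟩ := hpre
  unfold Spec_problem_1 problem_1 problem_1_alt
  have h0 : PySem.List.pyGet? data (0 : Int) = some (data.getD 0 []) := by
    have := PySem.List.pyGet?_natCast data 0
    simp only [Nat.cast_zero] at this
    rw [this]
    simp [List.getD, List.getElem?_eq_getElem (by omega : 0 < data.length)]
  have h1 : PySem.List.pyGet? data (1 : Int) = some (data.getD 1 []) := by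
    have := PySem.List.pyGet?_natCast data 1
    simp only [Nat.cast_one] at this
    rw [this]
    simp [List.getD, List.getElem?_eq_getElem (by omega : 1 < data.length)]
  simp only [h0, h1, Option.getD_some]
  rw [problem1Loop_eq _ _ _ _ rfl hle, foldl_absSum]
  simp [pvSumAbs]
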